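-- pv_equiv track=rewrite | github.com/WoodenStone/brainy-compress | flask-model/app.py | find_resize_hw
-- ===== SOURCE A (Python) =====
-- def find_resize_hw(original_h, original_w, factor_h=128, factor_w=128):
--     # 找到最接近 128 的倍数的值
--     # why 128? 试出来的 - -!
--     h = original_h
--     w = original_w
--     while h % factor_h != 0:
--         h += 1
--     while w % factor_w != 0:
--         w += 1
--     return h, w
-- ===== SOURCE B (Python) =====
-- def find_resize_hw(original_h, original_w, factor_h=128, factor_w=128):
--     # closed-form round-up to the next multiple (no loop)
--     h = original_h + (-original_h) % abs(factor_h)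
--     w = original_w + (-original_w) % abs(factor_w)
--     return h, w
-- ===== Notes on version B (the rewrite author's own statement) =====
-- stated objective: faster
-- what changed: Replaces the two unit-increment while loops with the closed-form round-up h + (-h) % abs(f), computing the next multiple in O(1) instead of up to |f| iterations.
-- outside the precondition, e.g. on find_resize_hw(5, 5, 0, 128): A raises ZeroDivisionError, B raises ZeroDivisionError
import Mathlib
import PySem

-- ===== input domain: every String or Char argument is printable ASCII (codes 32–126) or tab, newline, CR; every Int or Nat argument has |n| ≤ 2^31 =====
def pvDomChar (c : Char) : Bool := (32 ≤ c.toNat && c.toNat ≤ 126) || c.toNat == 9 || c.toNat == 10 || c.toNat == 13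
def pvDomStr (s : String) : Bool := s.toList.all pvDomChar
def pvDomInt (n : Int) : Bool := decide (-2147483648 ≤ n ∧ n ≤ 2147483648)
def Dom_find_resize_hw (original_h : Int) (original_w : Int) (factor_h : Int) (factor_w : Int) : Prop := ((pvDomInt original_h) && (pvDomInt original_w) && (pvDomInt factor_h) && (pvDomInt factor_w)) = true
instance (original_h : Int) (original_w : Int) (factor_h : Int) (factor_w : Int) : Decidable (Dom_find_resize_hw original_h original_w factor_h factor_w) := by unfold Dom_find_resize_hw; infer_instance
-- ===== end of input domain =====

-- B replaces A's two unit-step while loops by the closed-form round-up h + (-h) % abs(f) (objective: faster).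

-- ===== PORT A =====
-- One step of A's loop: when f does not divide x, the distance (-x) % |f| to the
-- next multiple is ≥ 1 and drops by exactly 1 after x+1. Cited by the port's decreasing_by.
theorem pvStep (x f : Int) (hf : f ≠ 0) (hnd : ¬ f ∣ x) :
    1 ≤ (-x) % |f| ∧ (-(x + 1)) % |f| = (-x) % |f| - 1 := by
  have hfpos : 0 < |f| := abs_pos.mpr hf
  have hb := Int.emod_nonneg (-x) (by omega : |f| ≠ 0)
  have hlt := Int.emod_lt_of_pos (-x) hfpos
  have hr0 : (-x) % |f| ≠ 0 := fun h0 =>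
    hnd ((abs_dvd f x).mp (Int.dvd_neg.mp (Int.dvd_of_emod_eq_zero h0)))
  have hf2 : 2 ≤ |f| := by
    rcases eq_or_lt_of_le (by omega : (1:Int) ≤ |f|) with h | h
    · exact absurd ((abs_dvd f x).mp (h ▸ one_dvd x)) hnd
    · omega
  refine ⟨by omega, ?_⟩
  have h1 : (-(x + 1)) % |f| = ((-x) % |f| - 1 % |f|) % |f| := by
    rw [show (-(x+1) : Int) = -x - 1 by ring, Int.sub_emod]
  have hone : (1 : Int) % |f| = 1 := Int.emod_eq_of_lt (by omega) (by omega)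
  rw [h1, hone, Int.emod_eq_of_lt (by omega) (by omega)]

-- A's 'while x % f != 0: x += 1' loop; the 'f = 0' guard only makes the
-- recursion total (Python raises ZeroDivisionError there; excluded by Pre_).
def pvLoopUp (x f : Int) : Int :=
  if hf : f = 0 then x
  else if PySem.Int.mod x f ≠ 0 then pvLoopUp (x + 1) f else x
termination_by ((-x) % |f|).toNat
decreasing_by
  have hnd : ¬ f ∣ x := fun hd => (by assumption : PySem.Int.mod x f ≠ 0)
    ((PySem.Int.mod_eq_zero_iff_dvd x f).mpr hd)
  have := pvStep x f hf hnd
  omega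

def find_resize_hw (original_h : Int) (original_w : Int) (factor_h : Int) (factor_w : Int) : Int × Int :=
  (pvLoopUp original_h factor_h, pvLoopUp original_w factor_w)

-- ===== PORT B =====
def find_resize_hw_alt (original_h : Int) (original_w : Int) (factor_h : Int) (factor_w : Int) : Int × Int :=
  (original_h + PySem.Int.mod (-original_h) |factor_h|,
   original_w + PySem.Int.mod (-original_w) |factor_w|)

-- ===== PRECONDITION & SPEC =====
-- Pre_ excludes factor_h = 0 or factor_w = 0, where Python A raises ZeroDivisionError (and B raises too).
def Pre_find_resize_hw (original_h : Int) (original_w : Int) (factor_h : Int) (factor_w : Int) : Prop :=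
  factor_h ≠ 0 ∧ factor_w ≠ 0
instance (original_h : Int) (original_w : Int) (factor_h : Int) (factor_w : Int) : Decidable (Pre_find_resize_hw original_h original_w factor_h factor_w) := by unfold Pre_find_resize_hw; infer_instance
def pvWitness_find_resize_hw : Int × Int × Int × Int := (5, 7, 128, 128)

def Spec_find_resize_hw (original_h : Int) (original_w : Int) (factor_h : Int) (factor_w : Int) (out : Int × Int) : Prop := out = find_resize_hw_alt original_h original_w factor_h factor_w
instance (original_h : Int) (original_w : Int) (factor_h : Int) (factor_w : Int) (out : Int × Int) : Decidable (Spec_find_resize_hw original_h original_w factor_h factor_w out) := by unfold Spec_find_resize_hw; infer_instance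

-- ===== CLAIM (what is proved, stated in full; the proofs are below) =====
def Claim_equal_find_resize_hw : Prop := ∀ (original_h : Int) (original_w : Int) (factor_h : Int) (factor_w : Int), Dom_find_resize_hw original_h original_w factor_h factor_w → Pre_find_resize_hw original_h original_w factor_h factor_w → Spec_find_resize_hw original_h original_w factor_h factor_w (find_resize_hw original_h original_w factor_h factor_w)

-- ===== LEMMAS AND PROOFS =====

-- A's loop computes the closed form: pvLoopUp x f = x + (-x) % |f| for f ≠ 0.
theorem pvLoopUp_eq (f : Int) (hf : f ≠ 0) :
    ∀ n (x : Int), ((-x) % |f|).toNat = n → pvLoopUp x f = x + PySem.Int.mod (-x) |f| := by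
  have hfpos : 0 < |f| := abs_pos.mpr hf
  intro n
  induction n using Nat.strong_induction_on with
  | _ n ih =>
    intro x hn
    rw [pvLoopUp.eq_def]
    simp only [hf, dite_false]
    rw [PySem.Int.mod_eq_emod_of_pos hfpos]
    by_cases hz : PySem.Int.mod x f = 0
    · simp only [hz, ne_eq, not_true_eq_false, if_false]
      have hd : f ∣ x := (PySem.Int.mod_eq_zero_iff_dvd x f).mp hz
      have h0 : (-x) % |f| = 0 :=
        Int.emod_eq_zero_of_dvd (Int.dvd_neg.mpr ((abs_dvd f x).mpr hd))
      rw [h0]; ring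
    · simp only [hz, ne_eq, not_false_eq_true, if_true]
      have hnd : ¬ f ∣ x := fun hd => hz ((PySem.Int.mod_eq_zero_iff_dvd x f).mpr hd)
      have hb := Int.emod_nonneg (-x) (by omega : |f| ≠ 0)
      obtain ⟨hr1, hstep⟩ := pvStep x f hf hnd
      have hdec : ((-(x + 1)) % |f|).toNat < n := by omega
      rw [ih _ hdec (x + 1) rfl, PySem.Int.mod_eq_emod_of_pos hfpos, hstep]
      ring

-- ===== VERDICT (by name: the statement is the Claim_ definition above) =====
theorem find_resize_hw_spec : Claim_equal_find_resize_hw := by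
  intro h w fh fw _ hpre
  unfold Spec_find_resize_hw find_resize_hw find_resize_hw_alt
  rw [pvLoopUp_eq fh hpre.1 _ h rfl, pvLoopUp_eq fw hpre.2 _ w rfl]
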